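-- pv_equiv track=rewrite | github.com/carmandale/media_transcribe_manager | tests/demo_srt_savings.py | create_realistic_srt
-- ===== SOURCE A (Python) =====
-- def create_realistic_srt(num_segments=3000):
--     """Create a realistic SRT file similar to actual interview transcripts."""
--     # Common repeated phrases in interviews
--     repeated_phrases = [
--         ("Mm-hmm.", 150),
--         ("Yes.", 120),
--         ("Ja.", 200),
--         ("Uh...", 80),
--         ("Yeah.", 60),
--         ("No.", 40),
--         ("I see.", 30),
--         ("Okay.", 50),
--         ("Thank you.", 20),
--         ("Please continue.", 15),
--     ]
--
--     # Generate SRT content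
--     lines = []
--     segment_num = 1
--     time_offset = 0
--
--     # Add repeated phrases throughout
--     for phrase, count in repeated_phrases:
--         for _ in range(count):
--             start_min = time_offset // 60
--             start_sec = time_offset % 60
--             end_offset = time_offset + 2
--             end_min = end_offset // 60
--             end_sec = end_offset % 60
--
--             lines.append(f"{segment_num}")
--             lines.append(f"00:{start_min:02d}:{start_sec:02d},000 --> 00:{end_min:02d}:{end_sec:02d},000")
--             lines.append(phrase)
--             lines.append("")
--
--             segment_num += 1
--             time_offset += 3
--
--             if segment_num > num_segments:
--                 break
--         if segment_num > num_segments: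
--             break
--
--     # Fill remaining with unique content
--     unique_phrases = [
--         "Can you tell me about your childhood?",
--         "We lived in a small village near Berlin.",
--         "My father was a teacher at the local school.",
--         "Life was difficult during those years.",
--         "We had to leave everything behind.",
--         "I remember the day very clearly.",
--         "It was a cold winter morning.",
--         "The soldiers came to our house.",
--         "My mother tried to protect us.",
--         "We were taken to the train station.",
--     ]
--
--     while segment_num <= num_segments:
--         for phrase in unique_phrases:
--             if segment_num > num_segments:
--                 break
--
--             start_min = time_offset // 60
--             start_sec = time_offset % 60
--             end_offset = time_offset + 4
--             end_min = end_offset // 60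
--             end_sec = end_offset % 60
--
--             # Add some variation
--             modified_phrase = f"{phrase} (segment {segment_num})"
--
--             lines.append(f"{segment_num}")
--             lines.append(f"00:{start_min:02d}:{start_sec:02d},000 --> 00:{end_min:02d}:{end_sec:02d},000")
--             lines.append(modified_phrase)
--             lines.append("")
--
--             segment_num += 1
--             time_offset += 5
--
--     return "\n".join(lines)
-- ===== SOURCE B (Python) =====
-- REPEATED_PHRASES = [
--     ("Mm-hmm.", 150),
--     ("Yes.", 120),
--     ("Ja.", 200),
--     ("Uh...", 80),
--     ("Yeah.", 60),
--     ("No.", 40),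
--     ("I see.", 30),
--     ("Okay.", 50),
--     ("Thank you.", 20),
--     ("Please continue.", 15),
-- ]
--
-- UNIQUE_PHRASES = [
--     "Can you tell me about your childhood?",
--     "We lived in a small village near Berlin.",
--     "My father was a teacher at the local school.",
--     "Life was difficult during those years.",
--     "We had to leave everything behind.",
--     "I remember the day very clearly.",
--     "It was a cold winter morning.",
--     "The soldiers came to our house.",
--     "My mother tried to protect us.",
--     "We were taken to the train station.",
-- ]
--
--
-- def create_realistic_srt(num_segments=3000):
--     """Build a flat list of (text, step, end_delta) segment specs first,
--     then emit all SRT blocks in one formatting pass."""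
--     specs = []
--     # capped repeats: step 3, end delta 2
--     for phrase, count in REPEATED_PHRASES:
--         if len(specs) >= num_segments:
--             break
--         take = min(count, num_segments - len(specs))
--         specs.extend((phrase, 3, 2) for _ in range(take))
--     # cycling unique phrases: step 5, end delta 4
--     i = 0
--     while len(specs) < num_segments:
--         phrase = UNIQUE_PHRASES[i % 10]
--         specs.append((f"{phrase} (segment {len(specs) + 1})", 5, 4))
--         i += 1
--     # single formatting pass
--     lines = []
--     t = 0
--     for seg, (text, step, delta) in enumerate(specs, 1):
--         e = t + delta
--         lines.append(f"{seg}")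
--         lines.append(f"00:{t // 60:02d}:{t % 60:02d},000 --> 00:{e // 60:02d}:{e % 60:02d},000")
--         lines.append(text)
--         lines.append("")
--         t += step
--     return "\n".join(lines)
-- ===== Notes on version B (the rewrite author's own statement) =====
-- stated objective: alternative
-- what changed: B first builds a flat list of (text, step, end-delta) segment specs (capped repeated phrases, then cycling unique phrases) and then emits all SRT blocks in one uniform formatting pass, replacing A's two phases of inline emission inside break-laden nested loops.
-- intended difference: For num_segments <= 0, A still returns one 'Mm-hmm.' segment block because it checks the cap only after the first emission; B returns the empty string, the intended output for a non-positive segment count. — e.g. on create_realistic_srt(0): A returns "1\n00:00:00,000 --> 00:00:02,000\nMm-hmm.\n", B returns ""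
import Mathlib
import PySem

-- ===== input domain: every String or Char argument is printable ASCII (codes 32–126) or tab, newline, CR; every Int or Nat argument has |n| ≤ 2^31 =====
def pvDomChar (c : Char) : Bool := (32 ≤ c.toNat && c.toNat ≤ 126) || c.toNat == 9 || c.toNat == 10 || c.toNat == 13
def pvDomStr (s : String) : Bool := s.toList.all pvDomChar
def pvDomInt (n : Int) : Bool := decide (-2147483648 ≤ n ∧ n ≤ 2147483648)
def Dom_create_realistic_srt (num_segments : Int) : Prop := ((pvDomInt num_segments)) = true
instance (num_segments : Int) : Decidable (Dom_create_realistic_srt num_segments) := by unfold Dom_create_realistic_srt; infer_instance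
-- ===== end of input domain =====

-- B builds a flat spec table (text, step, end-delta) first and formats it in one pass,
-- instead of A's two phases of inline emission inside break-laden nested loops ("alternative";
-- the two implementations differ only on num_segments ≤ 0, stated in D_ below).

-- ===== PORT A =====
def repeatedPhrases : List (String × Int) :=
  [("Mm-hmm.", 150), ("Yes.", 120), ("Ja.", 200), ("Uh...", 80), ("Yeah.", 60),
   ("No.", 40), ("I see.", 30), ("Okay.", 50), ("Thank you.", 20), ("Please continue.", 15)]

def uniquePhrases : List String :=
  ["Can you tell me about your childhood?",
   "We lived in a small village near Berlin.",
   "My father was a teacher at the local school.",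
   "Life was difficult during those years.",
   "We had to leave everything behind.",
   "I remember the day very clearly.",
   "It was a cold winter morning.",
   "The soldiers came to our house.",
   "My mother tried to protect us.",
   "We were taken to the train station."]

-- f"00:{t//60:02d}:{t%60:02d},000 --> 00:{e//60:02d}:{e%60:02d},000"; both Pythons
-- build this very line, so both ports share the helper.  %02d = pad str(x) to width 2 with '0'.
def pad2 (x : Int) : String :=
  let s := PySem.Int.toStr x
  if PySem.Str.len s < 2 then "0" ++ s else s

def tline (t e : Int) : String :=
  "00:" ++ pad2 (PySem.Int.floordiv t 60) ++ ":" ++ pad2 (PySem.Int.mod t 60) ++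
  ",000 --> 00:" ++ pad2 (PySem.Int.floordiv e 60) ++ ":" ++ pad2 (PySem.Int.mod e 60) ++ ",000"

-- `for _ in range(count)` with the `if segment_num > num_segments: break` check after each emission
def srtInner (fuel : Nat) (phrase : String) (n : Int) (lines : List String) (seg t : Int) :
    (List String × Int × Int) × Bool :=
  match fuel with
  | 0 => ((lines, seg, t), false)
  | f + 1 =>
    let lines' := lines ++ [PySem.Int.toStr seg, tline t (t + 2), phrase, ""]
    if seg + 1 > n then ((lines', seg + 1, t + 3), true)
    else srtInner f phrase n lines' (seg + 1) (t + 3)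

-- `for phrase, count in repeated_phrases` with the outer `break`
def srtPhase1 : List (String × Int) → Int → List String → Int → Int → List String × Int × Int
  | [], _, lines, seg, t => (lines, seg, t)
  | (phrase, c) :: rest, n, lines, seg, t =>
    let r := srtInner c.toNat phrase n lines seg t
    if r.2 then r.1
    else if r.1.2.1 > n then r.1
    else srtPhase1 rest n r.1.1 r.1.2.1 r.1.2.2

-- `for phrase in unique_phrases` with its leading `if segment_num > num_segments: break`
def srtSweep : List String → Int → List String → Int → Int → List String × Int × Int
  | [], _, lines, seg, t => (lines, seg, t)
  | phrase :: rest, n, lines, seg, t =>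
    if seg > n then (lines, seg, t)
    else srtSweep rest n
      (lines ++ [PySem.Int.toStr seg, tline t (t + 4),
                 phrase ++ " (segment " ++ PySem.Int.toStr seg ++ ")", ""])
      (seg + 1) (t + 5)

-- `while segment_num <= num_segments` (fuel: each sweep with seg ≤ n emits at least one segment)
def srtPhase2 (fuel : Nat) (n : Int) (lines : List String) (seg t : Int) :
    List String × Int × Int :=
  match fuel with
  | 0 => (lines, seg, t)
  | f + 1 =>
    if seg ≤ n then
      let r := srtSweep uniquePhrases n lines seg t
      srtPhase2 f n r.1 r.2.1 r.2.2
    else (lines, seg, t)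

def create_realistic_srt (num_segments : Int) : String :=
  let r1 := srtPhase1 repeatedPhrases num_segments [] 1 0
  let r2 := srtPhase2 (num_segments + 1 - r1.2.1).toNat num_segments r1.1 r1.2.1 r1.2.2
  PySem.Str.join "\n" r2.1

-- ===== PORT B =====
-- capped repeats: spec = (text, step, end_delta)
def bSpecs1 : List (String × Int) → Int → List (String × Int × Int) → List (String × Int × Int)
  | [], _, acc => acc
  | (phrase, c) :: rest, n, acc =>
    if (acc.length : Int) ≥ n then acc
    else bSpecs1 rest n (acc ++ List.replicate (min c (n - (acc.length : Int))).toNat (phrase, 3, 2))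

-- `while len(specs) < num_segments` appending UNIQUE_PHRASES[i % 10] (fuel: one append per step)
def bSpecs2 (fuel : Nat) (n : Int) (i : Int) (acc : List (String × Int × Int)) :
    List (String × Int × Int) :=
  match fuel with
  | 0 => acc
  | f + 1 =>
    if (acc.length : Int) < n then
      let phrase := ((PySem.List.pyGet? uniquePhrases (PySem.Int.mod i 10)).getD "")
      bSpecs2 f n (i + 1)
        (acc ++ [(phrase ++ " (segment " ++ PySem.Int.toStr ((acc.length : Int) + 1) ++ ")", 5, 4)])
    else acc

-- the single formatting pass (enumerate(specs, 1), threading the time offset)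
def bFormat : List (String × Int × Int) → Int → Int → List String → List String
  | [], _, _, lines => lines
  | (text, step, delta) :: rest, seg, t, lines =>
    bFormat rest (seg + 1) (t + step)
      (lines ++ [PySem.Int.toStr seg, tline t (t + delta), text, ""])

def create_realistic_srt_alt (num_segments : Int) : String :=
  let s1 := bSpecs1 repeatedPhrases num_segments []
  let s := bSpecs2 (num_segments - (s1.length : Int)).toNat num_segments 0 s1
  PySem.Str.join "\n" (bFormat s 1 0 [])

-- ===== PRECONDITION & SPEC =====
-- For num_segments ≤ 0, A still returns one "Mm-hmm." segment block because it checks the cap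
-- only after the first emission; B returns the empty string, the intended output for a
-- non-positive segment count.
def D_create_realistic_srt (num_segments : Int) : Prop := num_segments ≤ 0
instance (num_segments : Int) : Decidable (D_create_realistic_srt num_segments) := by
  unfold D_create_realistic_srt; infer_instance

def Spec_create_realistic_srt (num_segments : Int) (out : String) : Prop :=
  ¬ D_create_realistic_srt num_segments → out = create_realistic_srt_alt num_segments
instance (num_segments : Int) (out : String) : Decidable (Spec_create_realistic_srt num_segments out) := by
  unfold Spec_create_realistic_srt; infer_instance

def pvDiffWitness_create_realistic_srt : Int := 0
def pvDiffWitnessOut_create_realistic_srt : String × String :=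
  ("1\n00:00:00,000 --> 00:00:02,000\nMm-hmm.\n", "")

-- ===== CLAIM (what is proved, stated in full; the proofs are below) =====
def Claim_unchanged_create_realistic_srt : Prop := ∀ (num_segments : Int), Dom_create_realistic_srt num_segments → Spec_create_realistic_srt num_segments (create_realistic_srt num_segments)
def Claim_changed_create_realistic_srt : Prop := Dom_create_realistic_srt (pvDiffWitness_create_realistic_srt) ∧ D_create_realistic_srt (pvDiffWitness_create_realistic_srt) ∧ create_realistic_srt (pvDiffWitness_create_realistic_srt) = pvDiffWitnessOut_create_realistic_srt.1 ∧ create_realistic_srt_alt (pvDiffWitness_create_realistic_srt) = pvDiffWitnessOut_create_realistic_srt.2 ∧ pvDiffWitnessOut_create_realistic_srt.1 ≠ pvDiffWitnessOut_create_realistic_srt.2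
def Claim_exact_create_realistic_srt : Prop := ∀ (num_segments : Int), Dom_create_realistic_srt num_segments → D_create_realistic_srt num_segments → create_realistic_srt num_segments ≠ create_realistic_srt_alt num_segments

-- ===== LEMMAS AND PROOFS =====

-- total step (time increment) of a spec list
def stepSum : List (String × Int × Int) → Int
  | [] => 0
  | (_, s, _) :: r => s + stepSum r

theorem stepSum_append (xs ys : List (String × Int × Int)) :
    stepSum (xs ++ ys) = stepSum xs + stepSum ys := by
  induction xs with
  | nil => simp [stepSum]
  | cons x r ih => cases x with | mk a b => simp [stepSum, ih]; ring

theorem stepSum_replicate (m : Nat) (p : String) :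
    stepSum (List.replicate m (p, (3:Int), (2:Int))) = 3 * m := by
  induction m with
  | zero => simp [stepSum]
  | succ k ih => simp [List.replicate_succ, stepSum, ih]; ring

theorem bFormat_append (xs ys : List (String × Int × Int)) :
    ∀ (seg t : Int) (lines : List String),
      bFormat (xs ++ ys) seg t lines =
        bFormat ys (seg + xs.length) (t + stepSum xs) (bFormat xs seg t lines) := by
  induction xs with
  | nil => intro seg t lines; simp [bFormat, stepSum]
  | cons x r ih =>
    intro seg t lines
    cases x with | mk text sd =>
    cases sd with | mk step delta =>
    rw [List.cons_append, bFormat, bFormat, ih]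
    have h1 : (seg + 1) + (r.length : Int) = seg + ((((text, step, delta) :: r).length : Nat) : Int) := by
      simp only [List.length_cons]; push_cast; ring
    have h2 : (t + step) + stepSum r = t + stepSum ((text, step, delta) :: r) := by
      simp only [stepSum]; ring
    rw [h1, h2]

theorem bSpecs1_stop (ps : List (String × Int)) (n : Int) (acc : List (String × Int × Int))
    (h : (acc.length : Int) ≥ n) : bSpecs1 ps n acc = acc := by
  cases ps with
  | nil => rfl
  | cons p r => cases p with | mk a b => simp [bSpecs1, h]

theorem bSpecs2_stop (fuel : Nat) (n i : Int) (acc : List (String × Int × Int))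
    (h : ¬ (acc.length : Int) < n) : bSpecs2 fuel n i acc = acc := by
  cases fuel with
  | zero => rfl
  | succ f => simp [bSpecs2, h]

theorem srtPhase2_stop (fuel : Nat) (n : Int) (lines : List String) (seg t : Int)
    (h : ¬ seg ≤ n) : srtPhase2 fuel n lines seg t = (lines, seg, t) := by
  cases fuel with
  | zero => rfl
  | succ f => simp [srtPhase2, h]

theorem inner_eq (c : Nat) : ∀ (phrase : String) (n : Int) (acc : List (String × Int × Int))
    (seg t : Int), seg = (acc.length : Int) + 1 → t = stepSum acc → seg ≤ n →
    srtInner c phrase n (bFormat acc 1 0 []) seg t =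
      ((bFormat (acc ++ List.replicate (min c (n + 1 - seg).toNat) (phrase, 3, 2)) 1 0 [],
        seg + (min c (n + 1 - seg).toNat : Int), t + 3 * (min c (n + 1 - seg).toNat : Int)),
       decide ((n + 1 - seg).toNat ≤ c)) := by
  induction c with
  | zero =>
    intro phrase n acc seg t hseg ht hle
    have hd : ((n + 1 - seg).toNat ≤ 0) = False := by simp; omega
    simp [srtInner, hd]
  | succ c ih =>
    intro phrase n acc seg t hseg ht hle
    subst hseg ht
    have hx : (n + 1 - ((acc.length : Int) + 1)).toNat = (n - (acc.length : Int) - 1).toNat + 1 := by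
      omega
    have hline : bFormat acc 1 0 [] ++
        [PySem.Int.toStr ((acc.length : Int) + 1),
         tline (stepSum acc) (stepSum acc + 2), phrase, ""] =
        bFormat (acc ++ [(phrase, 3, 2)]) 1 0 [] := by
      rw [bFormat_append]
      simp only [bFormat, zero_add]
      ring_nf
    by_cases hbr : (acc.length : Int) + 1 + 1 > n
    · have h1 : (n + 1 - ((acc.length : Int) + 1)).toNat = 1 := by omega
      have hm : min (c + 1) 1 = 1 := by omega
      simp only [srtInner, if_pos hbr, h1, hm, List.replicate_one, Nat.cast_one]
      rw [hline]
      norm_num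
    · have hle2 : (acc.length : Int) + 1 + 1 ≤ n := by omega
      have ih' := ih phrase n (acc ++ [(phrase, 3, 2)]) ((acc.length : Int) + 1 + 1)
        (stepSum acc + 3) (by simp) (by rw [stepSum_append]; simp [stepSum])
        (by omega)
      simp only [srtInner, if_neg hbr]
      rw [hline, ih']
      have e1 : (n + 1 - ((acc.length : Int) + 1 + 1)).toNat =
          (n - (acc.length : Int) - 1).toNat := by omega
      rw [e1, hx, List.append_assoc]
      simp only [List.singleton_append, ← List.replicate_succ]
      have hdec : (decide ((n - (acc.length : Int) - 1).toNat ≤ c)) =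
          (decide ((n - (acc.length : Int) - 1).toNat + 1 ≤ c + 1)) :=
        decide_eq_decide.mpr (by omega)
      rw [hdec]
      push_cast
      have hmin2 : min ((c : Int) + 1) ((((n - (acc.length : Int) - 1).toNat : Int)) + 1) =
          min (c : Int) (((n - (acc.length : Int) - 1).toNat : Int)) + 1 := by omega
      rw [hmin2]
      ring_nf
      have hnat : min (1 + c) (1 + (-1 + n - (acc.length : Int)).toNat) =
          1 + min c ((-1 + n - (acc.length : Int)).toNat) := by omega
      rw [hnat]

theorem phase1_eq (ps : List (String × Int)) : ∀ (n : Int) (acc : List (String × Int × Int)),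
    (∀ pc ∈ ps, 1 ≤ pc.2) → (acc.length : Int) < n →
    srtPhase1 ps n (bFormat acc 1 0 []) ((acc.length : Int) + 1) (stepSum acc) =
      (bFormat (bSpecs1 ps n acc) 1 0 [], ((bSpecs1 ps n acc).length : Int) + 1,
       stepSum (bSpecs1 ps n acc)) := by
  induction ps with
  | nil =>
    intro n acc _ _
    simp [srtPhase1, bSpecs1]
  | cons pc rest ih =>
    obtain ⟨phrase, c⟩ := pc
    intro n acc hcnt hL
    have hc : 1 ≤ c := hcnt (phrase, c) (by simp)
    have hseg : (acc.length : Int) + 1 ≤ n := by omega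
    have hinner := inner_eq c.toNat phrase n acc ((acc.length : Int) + 1) (stepSum acc) rfl rfl hseg
    have hmin : (min c (n - (acc.length : Int))).toNat =
        min c.toNat (n + 1 - ((acc.length : Int) + 1)).toNat := by omega
    have hB : bSpecs1 ((phrase, c) :: rest) n acc =
        bSpecs1 rest n (acc ++ List.replicate
          (min c.toNat (n + 1 - ((acc.length : Int) + 1)).toNat) (phrase, 3, 2)) := by
      rw [bSpecs1, if_neg (by omega), hmin]
    set m := min c.toNat (n + 1 - ((acc.length : Int) + 1)).toNat with hm
    set acc2 := acc ++ List.replicate m (phrase, (3:Int), (2:Int)) with hacc2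
    have hlen2 : (acc2.length : Int) = (acc.length : Int) + m := by
      simp [hacc2]
    have hstep2 : stepSum acc2 = stepSum acc + 3 * m := by
      rw [hacc2, stepSum_append, stepSum_replicate]
    rw [srtPhase1, hB]
    by_cases hbk : (n + 1 - ((acc.length : Int) + 1)).toNat ≤ c.toNat
    · have hmeq : m = (n + 1 - ((acc.length : Int) + 1)).toNat := by omega
      have hfull : (acc2.length : Int) ≥ n := by rw [hlen2, hmeq]; omega
      rw [hinner]
      simp only [decide_eq_true_eq, hbk, if_pos]
      rw [bSpecs1_stop rest n acc2 hfull, hlen2, hstep2, hmeq]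
      simp only [Prod.mk.injEq]
      exact ⟨trivial, by omega, by omega⟩
    · have hmeq : m = c.toNat := by omega
      have hlt : (acc2.length : Int) < n := by rw [hlen2, hmeq]; omega
      rw [hinner]
      simp only [decide_eq_true_eq, hbk, if_false]
      rw [if_neg (by rw [← hmeq]; omega)]
      have hgoal := ih n acc2 (fun pc hpc => hcnt pc (by simp [hpc])) hlt
      have e1 : (acc.length : Int) + 1 +
          min (c.toNat : Int) (((n + 1 - ((acc.length : Int) + 1)).toNat : Int)) =
          (acc2.length : Int) + 1 := by omega
      have e2 : stepSum acc + 3 *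
          min (c.toNat : Int) (((n + 1 - ((acc.length : Int) + 1)).toNat : Int)) =
          stepSum acc2 := by omega
      rw [e1, e2]
      exact hgoal

theorem sweep_eq (us : List String) : ∀ (j : Nat) (i n : Int)
    (acc : List (String × Int × Int)) (fb : Nat),
    List.drop j uniquePhrases = us → 0 ≤ i →
    (us = [] ∨ PySem.Int.mod i 10 = (j : Int)) →
    min us.length (n - acc.length).toNat ≤ fb →
    ∃ acc',
      srtSweep us n (bFormat acc 1 0 []) ((acc.length : Int) + 1) (stepSum acc) =
        (bFormat acc' 1 0 [], ((acc'.length : Int)) + 1, stepSum acc') ∧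
      bSpecs2 fb n i acc =
        bSpecs2 (fb - min us.length (n - acc.length).toNat) n
          (i + (min us.length (n - acc.length).toNat : Int)) acc' ∧
      acc'.length = acc.length + min us.length (n - acc.length).toNat := by
  induction us with
  | nil =>
    intro j i n acc fb _ _ _ _
    exact ⟨acc, by simp [srtSweep], by simp, by simp⟩
  | cons p rest ih =>
    intro j i n acc fb hdrop hi hj hfb
    have hmod : PySem.Int.mod i 10 = (j : Int) := hj.resolve_left (by simp)
    by_cases hLn : (acc.length : Int) < n
    · have he : min (p :: rest).length (n - (acc.length : Int)).toNat =
          min rest.length (n - ((acc.length : Int) + 1)).toNat + 1 := by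
        simp only [List.length_cons]; omega
      cases fb with
      | zero => exact absurd hfb (by omega)
      | succ f =>
        have hget : (PySem.List.pyGet? uniquePhrases (PySem.Int.mod i 10)).getD "" = p := by
          rw [hmod]
          have h0 := List.getElem?_drop (xs := uniquePhrases) (i := j) (j := 0)
          rw [hdrop] at h0
          simp only [List.getElem?_cons_zero, Nat.add_zero] at h0
          simp [h0.symm]
        set text := p ++ " (segment " ++ PySem.Int.toStr ((acc.length : Int) + 1) ++ ")" with htext
        set acc2 := acc ++ [(text, (5:Int), (4:Int))] with hacc2
        have hlen2 : acc2.length = acc.length + 1 := by simp [hacc2]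
        have hlen2' : (acc2.length : Int) = (acc.length : Int) + 1 := by exact_mod_cast hlen2
        have hstep2 : stepSum acc2 = stepSum acc + 5 := by
          rw [hacc2, stepSum_append]; simp [stepSum]
        have hBstep : bSpecs2 (f + 1) n i acc = bSpecs2 f n (i + 1) acc2 := by
          rw [bSpecs2]
          simp only [hLn, if_true, hget, hacc2, htext]
        have hAstep : srtSweep (p :: rest) n (bFormat acc 1 0 []) ((acc.length : Int) + 1)
            (stepSum acc) =
            srtSweep rest n (bFormat acc2 1 0 []) ((acc2.length : Int) + 1) (stepSum acc2) := by
          rw [srtSweep, if_neg (by omega)]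
          have hline : bFormat acc 1 0 [] ++
              [PySem.Int.toStr ((acc.length : Int) + 1),
               tline (stepSum acc) (stepSum acc + 4), text, ""] =
              bFormat acc2 1 0 [] := by
            rw [hacc2, bFormat_append]
            simp only [bFormat, zero_add]
            ring_nf
          rw [← hline, htext, hlen2', hstep2]
        have hdrop' : List.drop (j + 1) uniquePhrases = rest := by
          rw [← List.tail_drop, hdrop]
          rfl
        have hj' : rest = [] ∨ PySem.Int.mod (i + 1) 10 = ((j + 1 : Nat) : Int) := by
          by_cases hr : rest = []
          · exact Or.inl hr
          · right
            have hlt : j + 1 < 10 := by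
              by_contra hge
              have : uniquePhrases.length ≤ j + 1 := by
                simp only [show uniquePhrases.length = 10 from rfl]; omega
              rw [List.drop_eq_nil_iff.mpr this] at hdrop'
              exact hr hdrop'.symm
            have hm1 := PySem.Int.mod_eq_emod_of_pos (a := i) (b := 10) (by norm_num)
            have hm2 := PySem.Int.mod_eq_emod_of_pos (a := i + 1) (b := 10) (by norm_num)
            rw [hm1] at hmod
            rw [hm2]
            push_cast
            omega
        have hfb' : min rest.length (n - (acc2.length : Int)).toNat ≤ f := by
          rw [hlen2']
          omega
        obtain ⟨acc', h1, h2, h3⟩ := ih (j + 1) (i + 1) n acc2 f hdrop' (by omega) hj' hfb'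
        refine ⟨acc', ?_, ?_, ?_⟩
        · rw [hAstep, h1]
        · rw [hBstep, h2, he]
          have e1 : f - min rest.length (n - ((acc2.length : Int))).toNat =
              f + 1 - (min rest.length (n - ((acc.length : Int) + 1)).toNat + 1) := by
            rw [hlen2']; omega
          have e2 : i + 1 + min ((rest.length : Int)) (((n - (acc2.length : Int)).toNat : Int)) =
              i + min ((((p :: rest).length : Nat) : Int)) (((n - (acc.length : Int)).toNat : Int)) := by
            rw [hlen2']
            simp only [List.length_cons]
            push_cast
            omega
          rw [e1, e2]
        · rw [he]
          rw [hlen2'] at h3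
          omega
    · have hz : (n - (acc.length : Int)).toNat = 0 := by omega
      refine ⟨acc, ?_, ?_, ?_⟩
      · rw [srtSweep, if_pos (by omega)]
      · have e1 : min (p :: rest).length (n - (acc.length : Int)).toNat = 0 := by
          simp [hz]
        have e2 : i + min (((p :: rest).length : Nat) : Int)
            (((n - (acc.length : Int)).toNat : Int)) = i := by
          simp only [List.length_cons]; push_cast [hz]; omega
        rw [e1, e2, Nat.sub_zero]
      · simp [hz]

theorem phase2_eq (fa : Nat) : ∀ (n : Int) (acc : List (String × Int × Int)) (i : Int) (fb : Nat),
    0 ≤ i → PySem.Int.mod i 10 = 0 →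
    (n - acc.length).toNat ≤ fa → (n - acc.length).toNat ≤ fb →
    srtPhase2 fa n (bFormat acc 1 0 []) ((acc.length : Int) + 1) (stepSum acc) =
      (bFormat (bSpecs2 fb n i acc) 1 0 [], ((bSpecs2 fb n i acc).length : Int) + 1,
       stepSum (bSpecs2 fb n i acc)) := by
  induction fa with
  | zero =>
    intro n acc i fb hi hmod hfa hfb
    have hge : ¬ (acc.length : Int) < n := by omega
    rw [bSpecs2_stop fb n i acc hge]
    rfl
  | succ fa ih =>
    intro n acc i fb hi hmod hfa hfb
    by_cases hLn : (acc.length : Int) < n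
    · have hlen10 : uniquePhrases.length = 10 := rfl
      obtain ⟨acc', h1, h2, h3⟩ := sweep_eq uniquePhrases 0 i n acc fb rfl hi
        (Or.inr (by simpa using hmod)) (by rw [hlen10]; omega)
      rw [hlen10] at h2 h3
      rw [srtPhase2, if_pos (by omega), h1]
      show srtPhase2 fa n (bFormat acc' 1 0 []) ((acc'.length : Int) + 1) (stepSum acc') =
        (bFormat (bSpecs2 fb n i acc) 1 0 [], ((bSpecs2 fb n i acc).length : Int) + 1,
         stepSum (bSpecs2 fb n i acc))
      by_cases hbig : 10 < (n - (acc.length : Int)).toNat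
      · have he10 : min 10 (n - (acc.length : Int)).toNat = 10 := by omega
        have hi10 : i + min (((10 : Nat)) : Int) (((n - (acc.length : Int)).toNat : Int)) = i + 10 := by
          push_cast; omega
        rw [he10] at h2 h3
        rw [hi10] at h2
        have hmod' : PySem.Int.mod (i + 10) 10 = 0 := by
          have hm1 := PySem.Int.mod_eq_emod_of_pos (a := i) (b := 10) (by norm_num)
          have hm2 := PySem.Int.mod_eq_emod_of_pos (a := i + 10) (b := 10) (by norm_num)
          rw [hm1] at hmod
          rw [hm2]
          omega
        have hlen' : (acc'.length : Int) = (acc.length : Int) + 10 := by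
          exact_mod_cast congrArg (Nat.cast (R := Int)) h3
        have hgoal := ih n acc' (i + 10) (fb - 10) (by omega) hmod' (by omega) (by omega)
        rw [h2]
        exact hgoal
      · have hee : min 10 (n - (acc.length : Int)).toNat = (n - (acc.length : Int)).toNat := by
          omega
        have hlen' : (acc'.length : Int) = n := by
          rw [hee] at h3
          have : (acc'.length : Int) = (acc.length : Int) + ((n - (acc.length : Int)).toNat : Int) := by
            exact_mod_cast congrArg (Nat.cast (R := Int)) h3
          omega
        have hstop : ¬ (acc'.length : Int) < n := by omega
        rw [bSpecs2_stop _ _ _ _ hstop] at h2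
        rw [h2, srtPhase2_stop fa n (bFormat acc' 1 0 []) ((acc'.length : Int) + 1)
          (stepSum acc') (by omega)]
    · rw [bSpecs2_stop fb n i acc hLn, srtPhase2, if_neg (by omega)]

theorem main_eq (n : Int) (h : 1 ≤ n) :
    create_realistic_srt n = create_realistic_srt_alt n := by
  have hcnt : ∀ pc ∈ repeatedPhrases, 1 ≤ pc.2 := by decide
  have h1 := phase1_eq repeatedPhrases n [] hcnt (by simpa using h)
  simp only [bFormat, stepSum, List.length_nil, Nat.cast_zero, zero_add] at h1
  have hmod0 : PySem.Int.mod 0 10 = 0 := by decide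
  have h2 := phase2_eq ((n + 1 - (((bSpecs1 repeatedPhrases n []).length : Int) + 1)).toNat) n
    (bSpecs1 repeatedPhrases n []) 0 ((n - ((bSpecs1 repeatedPhrases n []).length : Int)).toNat)
    (le_refl 0) hmod0 (by omega) (by omega)
  unfold create_realistic_srt create_realistic_srt_alt
  dsimp only
  rw [h1]
  dsimp only
  rw [h2]

theorem A_neg (n : Int) (h : n ≤ 0) :
    create_realistic_srt n = "1\n00:00:00,000 --> 00:00:02,000\nMm-hmm.\n" := by
  unfold create_realistic_srt
  have hstep : srtInner ((150 : Int)).toNat "Mm-hmm." n [] 1 0 =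
      (([PySem.Int.toStr 1, tline 0 (0 + 2), "Mm-hmm.", ""], 1 + 1, 0 + 3), true) := by
    rw [show ((150 : Int)).toNat = 149 + 1 from rfl, srtInner,
      if_pos (show (1 : Int) + 1 > n by omega)]
    rfl
  rw [show repeatedPhrases = ("Mm-hmm.", (150 : Int)) ::
    [("Yes.", (120 : Int)), ("Ja.", 200), ("Uh...", 80), ("Yeah.", 60), ("No.", 40),
     ("I see.", 30), ("Okay.", 50), ("Thank you.", 20), ("Please continue.", 15)] from rfl,
    srtPhase1, hstep]
  simp only [if_true]
  rw [show (n + 1 - (1 + 1)).toNat = 0 from by omega]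
  rw [srtPhase2]
  decide

theorem B_neg (n : Int) (h : n ≤ 0) : create_realistic_srt_alt n = "" := by
  unfold create_realistic_srt_alt
  simp only [repeatedPhrases, bSpecs1]
  rw [if_pos (show ((([] : List (String × Int × Int)).length : Int)) ≥ n from by simp; omega)]
  rw [show (n - ((([] : List (String × Int × Int)).length : Int))).toNat = 0 from by simp; omega]
  simp only [bSpecs2, bFormat]
  decide

-- ===== VERDICT (by name: the statement is the Claim_ definition above) =====
theorem create_realistic_srt_spec : Claim_unchanged_create_realistic_srt := by
  intro n _ hD
  exact main_eq n (by unfold D_create_realistic_srt at hD; omega)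

theorem create_realistic_srt_changed : Claim_changed_create_realistic_srt := by
  unfold Claim_changed_create_realistic_srt; decide

theorem create_realistic_srt_tight : Claim_exact_create_realistic_srt := by
  intro n _ hD
  rw [A_neg n hD, B_neg n hD]
  decide
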